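-- pv_equiv track=rewrite | github.com/dtx1007/tfg_24_25 | src/utils/vocab_utils.py | build_vocab_from_iterator
-- ===== SOURCE A (Python) =====
-- from collections import Counter
--
-- def build_vocab_from_iterator(
--     iterator: list[list[str]], specials: list[str] | None = None, min_freq: int = 1
-- ) -> dict[str, int]:
--     """
--     Builds a vocabulary from an iterator of token lists.
--
--     This function replaces torchtext.vocab.build_vocab_from_iterator and returns
--     a simple dictionary mapping tokens to indices.
--
--     Parameters
--     ----------
--     iterator : list[list[str]]
--         An iterator yielding lists of tokens.
--     specials : list[str], optional
--         A list of special tokens to add to the beginning of the vocabulary.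
--     min_freq : int, optional
--         The minimum frequency for a token to be included in the vocabulary.
--
--     Returns
--     -------
--     dict[str, int]
--         A dictionary mapping tokens to their integer indices.
--     """
--     counter = Counter()
--     for tokens in iterator:
--         counter.update(tokens)
--
--     # Sort by frequency (descending) and then by token (ascending)
--     sorted_items = sorted(counter.items(), key=lambda x: (-x[1], x[0]))
--
--     vocab = {}
--     index = 0
--
--     # Add special tokens first
--     if specials:
--         for token in specials:
--             if token not in vocab:
--                 vocab[token] = index
--                 index += 1
--
--     # Add tokens from the data
--     for word, freq in sorted_items:
--         if freq >= min_freq and word not in vocab: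
--             vocab[word] = index
--             index += 1
--
--     return vocab
-- ===== SOURCE B (Python) =====
-- def build_vocab_from_iterator(iterator, specials=None, min_freq=1):
--     counts = {}
--     for tokens in iterator:
--         for tok in tokens:
--             counts[tok] = counts.get(tok, 0) + 1
--     kept = [(tok, f) for tok, f in counts.items() if f >= min_freq]
--     freqs = sorted({f for _, f in kept}, reverse=True)
--     vocab = {}
--     if specials:
--         for tok in specials:
--             if tok not in vocab:
--                 vocab[tok] = len(vocab)
--     for f in freqs:
--         for tok in sorted(t for t, g in kept if g == f):
--             if tok not in vocab:
--                 vocab[tok] = len(vocab)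
--     return vocab
-- ===== Notes on version B (the rewrite author's own statement) =====
-- stated objective: alternative
-- what changed: Replaces A's single compound-key sort ((-freq, token)) of all counted items by a group-by-frequency scheme: filter by min_freq once, collect the distinct frequencies, walk them in descending order and sort each frequency bucket alphabetically, assigning indices with len(vocab) instead of a running counter.
import Mathlib
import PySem

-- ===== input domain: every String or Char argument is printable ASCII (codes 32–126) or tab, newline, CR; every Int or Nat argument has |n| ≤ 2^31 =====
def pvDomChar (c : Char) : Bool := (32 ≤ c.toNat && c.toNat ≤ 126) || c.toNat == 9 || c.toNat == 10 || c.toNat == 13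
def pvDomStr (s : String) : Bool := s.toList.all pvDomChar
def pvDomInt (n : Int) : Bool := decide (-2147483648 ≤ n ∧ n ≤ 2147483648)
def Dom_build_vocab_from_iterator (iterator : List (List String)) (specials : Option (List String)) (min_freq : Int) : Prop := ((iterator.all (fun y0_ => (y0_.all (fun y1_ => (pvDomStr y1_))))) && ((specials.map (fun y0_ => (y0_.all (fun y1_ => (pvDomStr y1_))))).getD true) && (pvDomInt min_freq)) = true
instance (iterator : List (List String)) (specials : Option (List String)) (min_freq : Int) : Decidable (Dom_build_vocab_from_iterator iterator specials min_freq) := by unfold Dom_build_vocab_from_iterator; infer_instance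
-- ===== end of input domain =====

-- B replaces A's single compound-key sort by a group-by-frequency scheme (descending distinct
-- frequencies, each bucket sorted alphabetically) with len(vocab) as the next index; equal output.

-- ===== PORT A =====
def build_vocab_from_iterator (iterator : List (List String)) (specials : Option (List String)) (min_freq : Int) : List (String × Int) :=
  -- counter = Counter(); for tokens in iterator: counter.update(tokens)
  let counter : PySem.Dict String Int :=
    iterator.foldl (fun c tokens => tokens.foldl (fun c t => c.modify t 0 (· + 1)) c) PySem.Dict.empty
  -- sorted_items = sorted(counter.items(), key=lambda x: (-x[1], x[0]))
  let sorted_items := PySem.List.sorted2 counter.items (fun x => -x.2) (fun x => x.1) false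
  -- vocab = {}; index = 0
  let st0 : PySem.Dict String Int × Int := (PySem.Dict.empty, 0)
  -- if specials: for token in specials: if token not in vocab: vocab[token] = index; index += 1
  let st1 : PySem.Dict String Int × Int :=
    match specials with
    | none => st0
    | some ss => ss.foldl (fun st token =>
        if !st.1.contains token then (st.1.insert token st.2, st.2 + 1) else st) st0
  -- for word, freq in sorted_items: if freq >= min_freq and word not in vocab: …
  let st2 := sorted_items.foldl (fun st wf =>
    if decide (min_freq ≤ wf.2) && !st.1.contains wf.1 then (st.1.insert wf.1 st.2, st.2 + 1) else st) st1
  st2.1.items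

-- ===== PORT B =====
def build_vocab_from_iterator_alt (iterator : List (List String)) (specials : Option (List String)) (min_freq : Int) : List (String × Int) :=
  -- counts[tok] = counts.get(tok, 0) + 1
  let counts : PySem.Dict String Int :=
    iterator.foldl (fun c tokens => tokens.foldl (fun c t => c.insert t (c.getD t 0 + 1)) c) PySem.Dict.empty
  -- kept = [(tok, f) for tok, f in counts.items() if f >= min_freq]
  let kept := counts.items.filter (fun p => decide (min_freq ≤ p.2))
  -- freqs = sorted({f for _, f in kept}, reverse=True)
  let freqs := PySem.List.sorted (PySem.Set.ofList (kept.map (fun p => p.2))) (fun f => f) true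
  let v0 : PySem.Dict String Int := PySem.Dict.empty
  -- if specials: for tok in specials: if tok not in vocab: vocab[tok] = len(vocab)
  let v1 : PySem.Dict String Int :=
    match specials with
    | none => v0
    | some ss => ss.foldl (fun v tok =>
        if !v.contains tok then v.insert tok ((PySem.Dict.size v : Int)) else v) v0
  -- for f in freqs: for tok in sorted(t for t, g in kept if g == f): if tok not in vocab: vocab[tok] = len(vocab)
  let v2 := freqs.foldl (fun v f =>
    (PySem.List.sorted ((kept.filter (fun p => decide (p.2 = f))).map (fun p => p.1)) (fun t => t) false).foldl
      (fun v tok => if !v.contains tok then v.insert tok ((PySem.Dict.size v : Int)) else v) v) v1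
  v2.items

-- ===== PRECONDITION & SPEC =====
def Spec_build_vocab_from_iterator (iterator : List (List String)) (specials : Option (List String)) (min_freq : Int) (out : List (String × Int)) : Prop := out = build_vocab_from_iterator_alt iterator specials min_freq
instance (iterator : List (List String)) (specials : Option (List String)) (min_freq : Int) (out : List (String × Int)) : Decidable (Spec_build_vocab_from_iterator iterator specials min_freq out) := by unfold Spec_build_vocab_from_iterator; infer_instance

-- ===== CLAIM (what is proved, stated in full; the proofs are below) =====
def Claim_equal_build_vocab_from_iterator : Prop := ∀ (iterator : List (List String)) (specials : Option (List String)) (min_freq : Int), Dom_build_vocab_from_iterator iterator specials min_freq → Spec_build_vocab_from_iterator iterator specials min_freq (build_vocab_from_iterator iterator specials min_freq)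

-- ===== LEMMAS AND PROOFS =====

-- the compound key (-freq, token), as one lexicographic key
def pvKey (x : String × Int) : Lex (Int × String) := toLex (-x.2, x.1)

theorem pvKey_inj : Function.Injective pvKey := by
  intro a b h
  unfold pvKey at h
  have h' : ((-a.2, a.1) : Int × String) = (-b.2, b.1) := toLex.injective h
  have h1 : -a.2 = -b.2 := congrArg Prod.fst h'
  have h2 : a.1 = b.1 := congrArg Prod.snd h'
  exact Prod.ext h2 (by omega)

-- A's sorted2 comparator is exactly strict lexicographic comparison of pvKey
theorem pv_cmp_eq (a b : String × Int) :
    (decide (-a.2 < -b.2) || !decide (-b.2 < -a.2) && decide (a.1 < b.1))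
      = decide (pvKey a < pvKey b) := by
  unfold pvKey
  by_cases h1 : (-a.2 : Int) < -b.2 <;> by_cases h2 : a.1 < b.1 <;>
    by_cases h3 : (-b.2 : Int) < -a.2 <;>
    simp [Prod.Lex.toLex_lt_toLex, h1, h2, h3] <;> omega

theorem pv_sorted2_eq_sorted_key (xs : List (String × Int)) :
    PySem.List.sorted2 xs (fun x => -x.2) (fun x => x.1) false
      = PySem.List.sorted xs pvKey false := by
  rw [PySem.List.sorted_eq_foldl_insertBy]
  simp only [PySem.List.sorted2, Bool.false_eq_true, if_false]
  congr 1
  funext acc x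
  congr 1
  funext a b
  exact pv_cmp_eq a b

-- distinct-value grouping partitions a list
theorem pv_flatMap_perm {α β : Type} (vs : List α) (f g : α → List β)
    (h : ∀ a ∈ vs, (f a).Perm (g a)) : (vs.flatMap f).Perm (vs.flatMap g) := by
  induction vs with
  | nil => rfl
  | cons v t ih =>
    rw [List.flatMap_cons, List.flatMap_cons]
    exact (h v (by simp)).append (ih (fun a ha => h a (by simp [ha])))

theorem pv_perm_flatMap_filter (vs : List Int) : ∀ (l : List (String × Int)), vs.Nodup →
    (∀ x ∈ l, x.2 ∈ vs) →
    (vs.flatMap (fun v => l.filter (fun x => decide (x.2 = v)))).Perm l := by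
  induction vs with
  | nil =>
    intro l _ hcov
    cases l with
    | nil => rfl
    | cons a t => exact absurd (hcov a (List.mem_cons_self)) (by simp)
  | cons v vs ih =>
    intro l hnd hcov
    rw [List.flatMap_cons]
    have hvs : vs.Nodup := (List.nodup_cons.mp hnd).2
    have hvnot : v ∉ vs := (List.nodup_cons.mp hnd).1
    have hstep : ∀ v' ∈ vs, l.filter (fun x => decide (x.2 = v'))
        = (l.filter (fun x => !decide (x.2 = v))).filter (fun x => decide (x.2 = v')) := by
      intro v' hv'
      rw [List.filter_filter]
      apply List.filter_congr
      intro x _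
      by_cases h : x.2 = v'
      · have hne : x.2 ≠ v := by rintro rfl; exact hvnot (h ▸ hv')
        have hvv : v' ≠ v := fun hvv => hne (by rw [h, hvv])
        simp [h, hvv]
      · simp [h]
    have hflat : vs.flatMap (fun v' => l.filter (fun x => decide (x.2 = v')))
        = vs.flatMap (fun v' => (l.filter (fun x => !decide (x.2 = v))).filter (fun x => decide (x.2 = v'))) := by
      rw [List.flatMap_def, List.flatMap_def, List.map_congr_left hstep]
    rw [hflat]
    have hcov' : ∀ x ∈ l.filter (fun x => !decide (x.2 = v)), x.2 ∈ vs := by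
      intro x hx
      have h1 := (List.mem_filter.mp hx).1
      have h2 := (List.mem_filter.mp hx).2
      have h3 : x.2 ≠ v := by simpa using h2
      rcases List.mem_cons.mp (hcov x h1) with h | h
      · exact absurd h h3
      · exact h
    exact (List.Perm.append_left _ (ih _ hvs hcov')).trans (List.filter_append_perm _ l)

-- turn pairwise ≤ plus distinct keys into pairwise <
theorem pv_pairwise_lt_of_le_nodup {α κ : Type} [LinearOrder κ] (key : α → κ) (l : List α)
    (h1 : l.Pairwise (fun a b => key a ≤ key b)) (h2 : (l.map key).Nodup) :
    l.Pairwise (fun a b => key a < key b) := by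
  have h3 : l.Pairwise (fun a b => key a ≠ key b) := List.pairwise_map.mp h2
  exact (h1.and h3).imp (fun h => lt_of_le_of_ne h.1 h.2)

-- pull a state-independent filter out of a guarded fold
theorem pv_foldl_if_and {α σ : Type} (p : α → Bool) (q : σ → α → Bool) (u : σ → α → σ) :
    ∀ (l : List α) (st : σ),
      l.foldl (fun st x => if p x && q st x then u st x else st) st
        = (l.filter p).foldl (fun st x => if q st x then u st x else st) st := by
  intro l
  induction l with
  | nil => intro st; rfl
  | cons x t ih =>
    intro st
    by_cases hp : p x = true
    · simp only [List.foldl_cons, List.filter_cons, hp, Bool.true_and, if_true]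
      exact ih _
    · rw [Bool.not_eq_true] at hp
      simp only [List.foldl_cons, List.filter_cons, hp, Bool.false_and, Bool.false_eq_true,
        if_false]
      exact ih _

-- A's explicit index counter always equals B's len(vocab)
theorem pv_fold_size (L : List String) : ∀ (d : PySem.Dict String Int),
    L.foldl (fun (st : PySem.Dict String Int × Int) t =>
        if !st.1.contains t then (st.1.insert t st.2, st.2 + 1) else st)
      (d, (PySem.Dict.size d : Int))
    = (L.foldl (fun v t => if !v.contains t then v.insert t ((PySem.Dict.size v : Int)) else v) d,
       (PySem.Dict.size (L.foldl (fun v t => if !v.contains t then v.insert t ((PySem.Dict.size v : Int)) else v) d) : Int)) := by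
  induction L with
  | nil => intro d; rfl
  | cons x t ih =>
    intro d
    by_cases hc : d.contains x = true
    · simp only [List.foldl_cons, hc, Bool.not_true, Bool.false_eq_true, if_false]
      exact ih d
    · rw [Bool.not_eq_true] at hc
      have hs : (d.insert x ((PySem.Dict.size d : Int))).size = d.size + 1 := by
        simp [PySem.Dict.size_insert, hc]
      simp only [List.foldl_cons, hc, Bool.not_false, if_true]
      have h2 := ih (d.insert x ((PySem.Dict.size d : Int)))
      rw [hs] at h2
      push_cast at h2
      exact h2


-- the filtered compound-key-sorted token sequence IS the descending-frequency bucket walk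
theorem pv_main_list (its : List (String × Int)) (mf : Int)
    (hnd : (its.map (fun x => x.1)).Nodup) :
    ((PySem.List.sorted its pvKey false).filter (fun x => decide (mf ≤ x.2))).map (fun x => x.1)
      = (PySem.List.sorted (PySem.Set.ofList ((its.filter (fun x => decide (mf ≤ x.2))).map (fun p => p.2))) (fun f => f) true).flatMap
          (fun f => PySem.List.sorted (((its.filter (fun x => decide (mf ≤ x.2))).filter (fun p => decide (p.2 = f))).map (fun p => p.1)) (fun t => t) false) := by
  set p : String × Int → Bool := fun x => decide (mf ≤ x.2) with hp
  set kept := its.filter p with hkept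
  set freqs := PySem.List.sorted (PySem.Set.ofList (kept.map (fun p => p.2))) (fun f => f) true with hfreqs
  set chunk : Int → List String :=
    fun f => PySem.List.sorted ((kept.filter (fun p => decide (p.2 = f))).map (fun p => p.1)) (fun t => t) false with hchunk
  have hnd_kept_fst : (kept.map (fun x => x.1)).Nodup :=
    List.Nodup.sublist (List.Sublist.map _ List.filter_sublist) hnd
  have hnd_freqs : freqs.Nodup := by
    rw [hfreqs]
    exact ((PySem.List.sorted_perm (PySem.Set.ofList (kept.map (fun p => p.2))) (fun f => f) true).symm).nodup
      (PySem.Set.nodup_ofList _)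
  have hcov : ∀ x ∈ kept, x.2 ∈ freqs := by
    intro x hx
    rw [hfreqs, PySem.List.mem_sorted, PySem.Set.mem_ofList]
    exact List.mem_map_of_mem hx
  have hItemsNd : its.Nodup := List.Nodup.of_map _ hnd
  have hmapK : (its.map pvKey).Nodup := hItemsNd.map pvKey_inj
  -- filtering the sorted items = sorting the filtered items
  have hsorted_pairs : PySem.List.sorted kept pvKey false = (PySem.List.sorted its pvKey false).filter p := by
    apply PySem.List.sorted_eq_of_perm_of_pairwise_lt
    · exact (PySem.List.sorted_perm its pvKey false).filter p
    · apply List.Pairwise.filter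
      apply pv_pairwise_lt_of_le_nodup
      · exact PySem.List.sorted_pairwise its pvKey
      · exact (((PySem.List.sorted_perm its pvKey false).map pvKey).symm).nodup hmapK
  -- the bucket walk is the sorted filtered items
  have hpairchunk_eq : ∀ f, ((kept.filter (fun p => decide (p.2 = f))).map (fun p => p.1)).map (fun t => (t, f))
      = kept.filter (fun p => decide (p.2 = f)) := by
    intro f
    rw [List.map_map]
    have h : ∀ q ∈ kept.filter (fun p => decide (p.2 = f)),
        ((fun t => (t, f)) ∘ fun p : String × Int => p.1) q = id q := by
      intro q hq
      have h2 : q.2 = f := of_decide_eq_true (List.mem_filter.mp hq).2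
      simp [Function.comp, ← h2]
    rw [List.map_congr_left h, List.map_id]
  have hys_perm : (freqs.flatMap (fun f => (chunk f).map (fun t => (t, f)))).Perm kept := by
    have h1 : ∀ f ∈ freqs, ((chunk f).map (fun t => (t, f))).Perm (kept.filter (fun p => decide (p.2 = f))) := by
      intro f _
      have := (PySem.List.sorted_perm ((kept.filter (fun p => decide (p.2 = f))).map (fun p => p.1)) (fun t => t) false).map (fun t => (t, f))
      rw [hpairchunk_eq f] at this
      exact this
    exact (pv_flatMap_perm freqs _ _ h1).trans (pv_perm_flatMap_filter freqs kept hnd_freqs hcov)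
  have hnd_chunk : ∀ f, (chunk f).Nodup := by
    intro f
    have hbase : ((kept.filter (fun p => decide (p.2 = f))).map (fun p => p.1)).Nodup :=
      List.Nodup.sublist (List.Sublist.map _ List.filter_sublist) hnd_kept_fst
    exact ((PySem.List.sorted_perm _ _ _).symm).nodup hbase
  have hys_pw : (freqs.flatMap (fun f => (chunk f).map (fun t => (t, f)))).Pairwise
      (fun a b => pvKey a < pvKey b) := by
    rw [List.flatMap_def, List.pairwise_flatten]
    constructor
    · intro L hL
      obtain ⟨f, _, rfl⟩ := List.mem_map.mp hL
      rw [List.pairwise_map]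
      have hle := PySem.List.sorted_pairwise ((kept.filter (fun p => decide (p.2 = f))).map (fun p => p.1)) (fun t => t)
      have hndid : ((chunk f).map (fun t => t)).Nodup := by
        simpa [List.map_id'] using hnd_chunk f
      have hlt := pv_pairwise_lt_of_le_nodup (fun t => t) (chunk f) hle hndid
      refine hlt.imp ?_
      intro a b h
      unfold pvKey
      rw [Prod.Lex.toLex_lt_toLex]
      exact Or.inr ⟨rfl, h⟩
    · have hfreq_lt : freqs.Pairwise (fun f1 f2 => f2 < f1) := by
        have h1 := PySem.List.sorted_pairwise_rev (PySem.Set.ofList (kept.map (fun p => p.2))) (fun f => f)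
        rw [← hfreqs] at h1
        have h2 : freqs.Pairwise (fun a b => a ≠ b) := hnd_freqs
        exact (h1.and h2).imp (fun h => lt_of_le_of_ne h.1 (Ne.symm h.2))
      rw [List.pairwise_map]
      refine hfreq_lt.imp ?_
      intro f1 f2 hlt x hx y hy
      obtain ⟨t1, _, rfl⟩ := List.mem_map.mp hx
      obtain ⟨t2, _, rfl⟩ := List.mem_map.mp hy
      unfold pvKey
      rw [Prod.Lex.toLex_lt_toLex]
      exact Or.inl (by omega)
  have hsorted_kept : PySem.List.sorted kept pvKey false
      = freqs.flatMap (fun f => (chunk f).map (fun t => (t, f))) :=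
    PySem.List.sorted_eq_of_perm_of_pairwise_lt _ _ _ hys_perm hys_pw
  rw [← hsorted_pairs, hsorted_kept, List.map_flatMap]
  have hout : ∀ f : Int, ((chunk f).map (fun t => (t, f))).map (fun x => x.1) = chunk f := by
    intro f
    have hcomp : ((fun x : String × Int => x.1) ∘ fun t => (t, f)) = id := rfl
    rw [List.map_map, hcomp, List.map_id]
  exact congrArg (fun fn => List.flatMap fn freqs) (funext hout)

-- ===== VERDICT (by name: the statement is the Claim_ definition above) =====
theorem build_vocab_from_iterator_spec : Claim_equal_build_vocab_from_iterator := by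
  intro iterator specials min_freq _
  unfold Spec_build_vocab_from_iterator build_vocab_from_iterator build_vocab_from_iterator_alt
  dsimp only
  set C := PySem.Dict.counter iterator.flatten with hC
  have hA : iterator.foldl (fun c tokens => tokens.foldl (fun c t => c.modify t 0 (· + 1)) c) PySem.Dict.empty = C := by
    rw [hC, PySem.Dict.counter_eq_foldl, List.foldl_flatten]
  have hB : iterator.foldl (fun c tokens => tokens.foldl (fun c t => c.insert t (c.getD t 0 + 1)) c) PySem.Dict.empty = C := by
    rw [hC, ← PySem.Dict.foldl_insert_getD_add_one_eq_counter, List.foldl_flatten]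
  rw [hA, hB]
  have hndfst : (C.items.map (fun x => x.1)).Nodup := by
    have hk : C.keys = PySem.Set.ofList iterator.flatten := by
      rw [hC]; exact PySem.Dict.keys_counter _
    have hk' : C.items.map (fun x => x.1) = C.keys := by
      simp [PySem.Dict.keys]
    rw [hk', hk]
    exact PySem.Set.nodup_ofList _
  -- fold over pairs only looks at the token component
  have hfold_pairs : ∀ (L : List (String × Int)) (st : PySem.Dict String Int × Int),
      L.foldl (fun st x => if !st.1.contains x.1 then (st.1.insert x.1 st.2, st.2 + 1) else st) st
        = (L.map (fun x => x.1)).foldl (fun st t => if !st.1.contains t then (st.1.insert t st.2, st.2 + 1) else st) st := by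
    intro L
    induction L with
    | nil => intro st; rfl
    | cons x t ih => intro st; simp only [List.foldl_cons, List.map_cons]; exact ih _
  -- nested per-bucket folds = one fold over the concatenation
  have hBfold : ∀ (fs : List Int) (ch : Int → List String) (v : PySem.Dict String Int),
      fs.foldl (fun v f => (ch f).foldl (fun v tok => if !v.contains tok then v.insert tok ((PySem.Dict.size v : Int)) else v) v) v
        = (fs.flatMap ch).foldl (fun v tok => if !v.contains tok then v.insert tok ((PySem.Dict.size v : Int)) else v) v := by
    intro fs ch
    induction fs with
    | nil => intro v; rfl
    | cons f t ih => intro v; rw [List.flatMap_cons, List.foldl_append]; simp only [List.foldl_cons]; rw [ih]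
  -- the whole data stage, from any starting vocab
  have hdata : ∀ (d : PySem.Dict String Int),
      ((PySem.List.sorted2 C.items (fun x => -x.2) (fun x => x.1) false).foldl
        (fun st wf => if decide (min_freq ≤ wf.2) && !st.1.contains wf.1 then (st.1.insert wf.1 st.2, st.2 + 1) else st)
        (d, (PySem.Dict.size d : Int))).1.items
      = ((PySem.List.sorted (PySem.Set.ofList ((C.items.filter (fun p => decide (min_freq ≤ p.2))).map (fun p => p.2))) (fun f => f) true).foldl
          (fun v f => (PySem.List.sorted (((C.items.filter (fun p => decide (min_freq ≤ p.2))).filter (fun p => decide (p.2 = f))).map (fun p => p.1)) (fun t => t) false).foldl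
            (fun v tok => if !v.contains tok then v.insert tok ((PySem.Dict.size v : Int)) else v) v) d).items := by
    intro d
    rw [pv_sorted2_eq_sorted_key]
    rw [show (fun (st : PySem.Dict String Int × Int) (wf : String × Int) =>
          if decide (min_freq ≤ wf.2) && !st.1.contains wf.1 then (st.1.insert wf.1 st.2, st.2 + 1) else st)
        = (fun st wf => if (fun x : String × Int => decide (min_freq ≤ x.2)) wf
              && (fun (st : PySem.Dict String Int × Int) (x : String × Int) => !st.1.contains x.1) st wf
            then (fun (st : PySem.Dict String Int × Int) (x : String × Int) => (st.1.insert x.1 st.2, st.2 + 1)) st wf else st) from rfl]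
    rw [pv_foldl_if_and (fun x : String × Int => decide (min_freq ≤ x.2))
      (fun (st : PySem.Dict String Int × Int) (x : String × Int) => !st.1.contains x.1)
      (fun (st : PySem.Dict String Int × Int) (x : String × Int) => (st.1.insert x.1 st.2, st.2 + 1))]
    rw [hfold_pairs]
    rw [pv_main_list C.items min_freq hndfst]
    rw [pv_fold_size]
    dsimp only
    rw [← hBfold]
  cases specials with
  | none =>
    dsimp only
    have h0 : ((PySem.Dict.empty : PySem.Dict String Int), (0 : Int))
        = ((PySem.Dict.empty : PySem.Dict String Int), ((PySem.Dict.size (PySem.Dict.empty : PySem.Dict String Int) : Nat) : Int)) := by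
      simp [PySem.Dict.size_empty]
    rw [h0]
    exact hdata _
  | some ss =>
    dsimp only
    have h0 : ((PySem.Dict.empty : PySem.Dict String Int), (0 : Int))
        = ((PySem.Dict.empty : PySem.Dict String Int), ((PySem.Dict.size (PySem.Dict.empty : PySem.Dict String Int) : Nat) : Int)) := by
      simp [PySem.Dict.size_empty]
    rw [h0, pv_fold_size]
    exact hdata _
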